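-- pv_equiv track=rewrite | github.com/CBIIT/bento-sts | pysts/app/mdb_tags.py | format_tags_records
-- ===== SOURCE A (Python) =====
-- from collections import namedtuple
--
-- def format_tags_records(dataset):
--     """
--     explanation
--     iterate, put keys out front, containing an array (for table)
--     """
--     dict_of_tags = {}
--     tagged_record = namedtuple('datatag', ['node', 'node_nanoid', 'property', 'property_nanoid', 'tag_value'])
--     for row in dataset:
--         tr = tagged_record(row[0], row[1], row[2], row[3], row[5])
--         tag = row[4]
--
--         if tag not in dict_of_tags:
--             dict_of_tags[tag] = []
--         dict_of_tags[tag].append(tr)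
--
--     # sort by node
--     for tag in dict_of_tags:
--         stuff = dict_of_tags[tag]
--         sorted_stuff = sorted(stuff, key=lambda x: (x.node, x.property, x.tag_value))
--         dict_of_tags[tag] = sorted_stuff
--     return dict_of_tags
-- ===== SOURCE B (Python) =====
-- from collections import namedtuple
--
-- def format_tags_records(dataset):
--     tagged_record = namedtuple('datatag', ['node', 'node_nanoid', 'property', 'property_nanoid', 'tag_value'])
--     tags = list(dict.fromkeys(row[4] for row in dataset))
--     return {
--         t: sorted((tagged_record(r[0], r[1], r[2], r[3], r[5]) for r in dataset if r[4] == t),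
--                   key=lambda x: (x.node, x.property, x.tag_value))
--         for t in tags
--     }
-- ===== Notes on version B (the rewrite author's own statement) =====
-- stated objective: alternative
-- what changed: A builds per-tag lists by mutating a dict while iterating, then sorts each stored list in a second mutation loop; B first computes the distinct tags in first-appearance order and then builds the whole result in one dict comprehension, filtering and sorting the dataset per tag with no intermediate mutable dict.
import Mathlib
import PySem

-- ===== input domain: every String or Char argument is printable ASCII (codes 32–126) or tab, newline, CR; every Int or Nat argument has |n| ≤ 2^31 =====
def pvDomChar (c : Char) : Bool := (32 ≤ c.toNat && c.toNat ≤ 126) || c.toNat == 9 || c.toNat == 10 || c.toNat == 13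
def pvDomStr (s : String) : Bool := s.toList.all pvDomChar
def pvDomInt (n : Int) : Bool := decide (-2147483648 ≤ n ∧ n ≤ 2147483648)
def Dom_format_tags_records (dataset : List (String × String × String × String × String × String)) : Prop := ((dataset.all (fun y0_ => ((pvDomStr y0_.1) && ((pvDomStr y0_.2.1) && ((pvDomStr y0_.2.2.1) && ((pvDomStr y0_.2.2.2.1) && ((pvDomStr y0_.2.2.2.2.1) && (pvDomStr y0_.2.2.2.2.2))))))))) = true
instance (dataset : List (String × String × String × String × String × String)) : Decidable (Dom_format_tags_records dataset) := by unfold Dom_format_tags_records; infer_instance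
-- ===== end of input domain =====

-- A mutates a dict (group, then sort each stored list in a second loop); B computes the distinct
-- tags once and builds the result in one comprehension, filtering and sorting the dataset per tag.


-- ===== PORT A =====
-- row helpers shared literally by both Pythons: row[4]; the namedtuple fields; the 3-tuple sort key
def pvTag (r : String × String × String × String × String × String) : String := r.2.2.2.2.1
def pvTr (r : String × String × String × String × String × String) : String × String × String × String × String :=
  (r.1, r.2.1, r.2.2.1, r.2.2.2.1, r.2.2.2.2.2)
-- Python's lexicographic 3-tuple-of-str key, modelled with Mathlib's Lex product (code-point order, exact on ASCII)
def pvKeyT (t : String × String × String × String × String) : Lex (String × Lex (String × String)) :=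
  toLex (t.1, toLex (t.2.2.1, t.2.2.2.2))

def format_tags_records (dataset : List (String × String × String × String × String × String)) : List (String × List (String × String × String × String × String)) :=
  -- for row in dataset: if tag not in d: d[tag] = []; d[tag].append(tr)  ==  d[tag] = d.get(tag, []) + [tr]
  let dict_of_tags := dataset.foldl
    (fun d row => d.modify (pvTag row) [] (fun l => l ++ [pvTr row])) PySem.Dict.empty
  -- for tag in dict_of_tags: dict_of_tags[tag] = sorted(dict_of_tags[tag], key=...)
  let dict_of_tags2 := dict_of_tags.keys.foldl
    (fun d tag => d.insert tag (PySem.List.sorted (d.getD tag []) pvKeyT)) dict_of_tags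
  dict_of_tags2.items

-- ===== PORT B =====
def format_tags_records_alt (dataset : List (String × String × String × String × String × String)) : List (String × List (String × String × String × String × String)) :=
  -- tags = list(dict.fromkeys(row[4] for row in dataset))
  let tags := PySem.List.dedup (dataset.map pvTag)
  -- {t: sorted((tr(r) for r in dataset if r[4] == t), key=...) for t in tags}
  tags.map (fun t =>
    (t, PySem.List.sorted ((dataset.filter (fun r => pvTag r == t)).map pvTr) pvKeyT))

-- ===== PRECONDITION & SPEC =====
def Spec_format_tags_records (dataset : List (String × String × String × String × String × String)) (out : List (String × List (String × String × String × String × String))) : Prop := out = format_tags_records_alt dataset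
instance (dataset : List (String × String × String × String × String × String)) (out : List (String × List (String × String × String × String × String))) : Decidable (Spec_format_tags_records dataset out) := by 
  unfold Spec_format_tags_records
  exact @instDecidableEqList _ (@instDecidableEqProd _ _ (by infer_instance) (by infer_instance)) _ _

-- ===== CLAIM (what is proved, stated in full; the proofs are below) =====
def Claim_equal_format_tags_records : Prop := ∀ (dataset : List (String × String × String × String × String × String)), Dom_format_tags_records dataset → Spec_format_tags_records dataset (format_tags_records dataset)

-- ===== LEMMAS AND PROOFS =====

-- the grouping fold, read back at one key
theorem pv_group_getD (l : List (String × String × String × String × String × String))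
    (t : String) :
    (l.foldl (fun d r => d.modify (pvTag r) [] (fun v => v ++ [pvTr r]))
        (PySem.Dict.empty : PySem.Dict String (List (String × String × String × String × String)))).getD t [] =
      (l.filter (fun r => pvTag r == t)).map pvTr := by
  have h := PySem.Dict.getD_foldl_modify_append
    (l := l.map (fun r => (pvTag r, pvTr r)))
    (d := (PySem.Dict.empty : PySem.Dict String (List (String × String × String × String × String))))
    (c := t)
  rw [List.foldl_map] at h
  simpa [List.filter_map, Function.comp] using h

-- the grouping fold's keys
theorem pv_group_keys (l : List (String × String × String × String × String × String)) :
    (l.foldl (fun d r => d.modify (pvTag r) [] (fun v => v ++ [pvTr r]))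
        (PySem.Dict.empty : PySem.Dict String (List (String × String × String × String × String)))).keys =
      PySem.Set.ofList (l.map pvTag) := by
  have h := PySem.Dict.keys_foldl_modify_key (l := l) (key := pvTag)
    (d0 := ([] : List (String × String × String × String × String)))
    (f := fun d r => fun v => v ++ [pvTr r])
    (d := (PySem.Dict.empty : PySem.Dict String (List (String × String × String × String × String))))
  simpa [PySem.Dict.keys_empty, PySem.Set.update, PySem.Set.ofList] using h

-- A's second loop: getD after re-inserting sorted values over a Nodup key list
theorem pv_sortloop_getD (l : List String) (hl : l.Nodup)
    (d : PySem.Dict String (List (String × String × String × String × String))) (t : String) :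
    (l.foldl (fun d tag => d.insert tag (PySem.List.sorted (d.getD tag []) pvKeyT)) d).getD t [] =
      if t ∈ l then PySem.List.sorted (d.getD t []) pvKeyT else d.getD t [] := by
  induction l generalizing d with
  | nil => simp
  | cons a l ih =>
      rcases List.nodup_cons.mp hl with ⟨ha, hl'⟩
      simp only [List.foldl_cons]
      rw [ih hl']
      by_cases hta : t = a
      · subst hta
        simp [ha, PySem.Dict.getD_insert_self]
      · rw [PySem.Dict.getD_insert_of_ne _ _ _ hta]
        by_cases htl : t ∈ l <;> simp [htl, hta]

-- A's second loop keeps the key list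
theorem pv_sortloop_keys (l : List String)
    (d : PySem.Dict String (List (String × String × String × String × String)))
    (hsub : ∀ x ∈ l, x ∈ d.keys) :
    (l.foldl (fun d tag => d.insert tag (PySem.List.sorted (d.getD tag []) pvKeyT)) d).keys =
      d.keys := by
  induction l generalizing d with
  | nil => rfl
  | cons a l ih =>
      simp only [List.foldl_cons]
      have hk : (d.insert a (PySem.List.sorted (d.getD a []) pvKeyT)).keys = d.keys :=
        PySem.Dict.keys_insert_of_contains _ _
          ((PySem.Dict.contains_iff_mem_keys _ _).mpr (hsub a (by simp)))
      rw [ih _ (fun x hx => by rw [hk]; exact hsub x (List.mem_cons_of_mem _ hx)), hk]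

-- ===== VERDICT (by name: the statement is the Claim_ definition above) =====
theorem format_tags_records_spec : Claim_equal_format_tags_records := by
  intro dataset _
  unfold Spec_format_tags_records format_tags_records format_tags_records_alt
  simp only []
  set G := dataset.foldl (fun d r => d.modify (pvTag r) [] (fun v => v ++ [pvTr r]))
    (PySem.Dict.empty : PySem.Dict String (List (String × String × String × String × String))) with hG
  have hGkeys : G.keys = PySem.Set.ofList (dataset.map pvTag) := pv_group_keys dataset
  have hGnodup : G.keys.Nodup :=
    PySem.Dict.nodup_keys_foldl_modify_key _ _ _ _ _ PySem.Dict.nodup_keys_empty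
  set d2 := G.keys.foldl
    (fun d tag => d.insert tag (PySem.List.sorted (d.getD tag []) pvKeyT)) G with hd2
  have hd2keys : d2.keys = G.keys := pv_sortloop_keys _ _ (fun x hx => hx)
  have hd2nodup : d2.keys.Nodup := hd2keys ▸ hGnodup
  rw [PySem.Dict.items_eq_map_keys d2 hd2nodup [], hd2keys, hGkeys,
    PySem.List.dedup_eq_ofList]
  apply List.map_congr_left
  intro k hk
  have hkmem : k ∈ G.keys := hGkeys ▸ hk
  have h1 : d2.getD k [] = PySem.List.sorted (G.getD k []) pvKeyT := by
    rw [hd2, pv_sortloop_getD G.keys hGnodup G k, if_pos hkmem]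
  rw [h1, hG, pv_group_getD dataset k]
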